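-- pv_equiv track=rewrite | github.com/yooooonzzzzzang/Algo_seed | 프로그래머스/unrated/250136. ［PCCP 기출문제］ 2번 ／ 석유 시추/［PCCP 기출문제］ 2번 ／ 석유 시추.py | solution
-- ===== SOURCE A (Python) =====
-- from collections import deque
--
-- def solution(land):
--     answer = [0] * len(land[0])
--     direction = [[-1, 0], [0,1], [1,0], [0,-1]]
--
--     for col in range(len(land[0])):
--         queue = deque()
--         for row in range(len(land)):
--             if land[row][col] ==1:
--                 queue.append((row,col))
--                 land[row][col] = -1
--             col_list = set()
--             cnt = 0
--             while queue:
--                 y, x = queue.popleft()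
--                 cnt += 1
--                 col_list.add(x)
--                 for dy, dx in direction:
--                     if 0 <= y+dy < len(land) and 0 <= x+dx < len(land[0]) and land[y+dy][x+dx] and land[y+dy][x+dx] != -1:
--                         queue.append((y+dy,x+dx))
--                         land[y+dy][x+dx] = -1
--             for c in col_list:
--                 answer[c] += cnt
--     ans = 0
--     for i in answer:
--         if i > ans:
--             ans = i
--     return ans
-- ===== SOURCE B (Python) =====
-- def solution(land):
--     rows, cols = len(land), len(land[0])
--     comps = []
--     for c in range(cols):
--         for r in range(rows):
--             if land[r][c] == 1:
--                 land[r][c] = -1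
--                 stack = [(r, c)]
--                 cells = []
--                 while stack:
--                     y, x = stack.pop()
--                     cells.append((y, x))
--                     for ny, nx in ((y - 1, x), (y, x + 1), (y + 1, x), (y, x - 1)):
--                         if 0 <= ny < rows and 0 <= nx < cols and land[ny][nx] not in (0, -1):
--                             land[ny][nx] = -1
--                             stack.append((ny, nx))
--                 comps.append((len(cells), {x for _, x in cells}))
--     return max((sum(size for size, cs in comps if c in cs) for c in range(cols)), default=0)
-- ===== Notes on version B (the rewrite author's own statement) =====
-- stated objective: alternative
-- what changed: B replaces A's per-seed BFS (deque + per-row-iteration col_list/cnt resets + in-place answer[c] += cnt updates + hand-rolled running max) by an explicit-stack DFS flood fill that collects each component's cell list into a components list (size, column set), then computes per-column sums from that list and returns max(..., default=0).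
-- outside the precondition, e.g. on solution([]): A raises IndexError, B raises IndexError; on solution([[1, 1], [0]]): A raises IndexError, B raises IndexError
import Mathlib
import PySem

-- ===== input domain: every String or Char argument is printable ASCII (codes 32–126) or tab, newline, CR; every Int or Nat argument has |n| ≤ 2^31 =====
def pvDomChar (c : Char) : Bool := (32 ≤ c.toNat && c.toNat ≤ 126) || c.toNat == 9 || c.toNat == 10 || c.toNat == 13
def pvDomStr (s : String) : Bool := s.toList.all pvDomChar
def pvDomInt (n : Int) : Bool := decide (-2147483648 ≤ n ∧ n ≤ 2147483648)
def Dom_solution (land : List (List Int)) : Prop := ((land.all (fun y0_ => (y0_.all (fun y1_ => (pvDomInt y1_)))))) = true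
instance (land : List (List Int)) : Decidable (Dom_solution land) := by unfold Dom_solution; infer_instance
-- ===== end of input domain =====

-- B is an explicit-stack DFS flood fill collecting a list of components, aggregated by per-column
-- sums at the end, instead of A's per-seed BFS with an incrementally updated answer array.
-- Both Pythons mutate `land` in place identically (visited oil cells become -1); the theorems
-- below are about the RETURN value.

-- ===== PORT A =====
-- Shared grid primitives (indexing helpers; every access in both programs is guarded by
-- 0 ≤ · checks or ranges, so `toNat`-based access is exact there; out-of-range getD yields 0,
-- which is only reached under a failed guard conjunct whose value is then irrelevant).
def gget (g : List (List Int)) (y x : Int) : Int := (g.getD y.toNat []).getD x.toNat 0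

def mark (g : List (List Int)) (y x : Int) : List (List Int) :=
  g.set y.toNat ((g.getD y.toNat []).set x.toNat (-1))

-- termination measure: number of grid entries different from -1
def gridMeasure (g : List (List Int)) : Nat :=
  (g.map (fun r => r.countP (fun v => decide (v ≠ -1)))).sum

lemma countP_set_neg_one (row : List Int) (j : Nat) (hj : j < row.length)
    (hv : row.getD j 0 ≠ -1) :
    (row.set j (-1)).countP (fun v => decide (v ≠ -1)) + 1
      = row.countP (fun v => decide (v ≠ -1)) := by
  induction row generalizing j with
  | nil => simp at hj
  | cons h t ih =>
    cases j with
    | zero => simp_all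
    | succ j =>
      simp only [List.set_cons_succ, List.countP_cons]
      have := ih j (by simpa using hj) (by simpa using hv)
      omega

lemma sum_set_nat (l : List Nat) (i : Nat) (a : Nat) (hi : i < l.length) :
    (l.set i a).sum + l.getD i 0 = l.sum + a := by
  induction l generalizing i with
  | nil => simp at hi
  | cons h t ih =>
    cases i with
    | zero => simp; omega
    | succ i =>
      simp only [List.set_cons_succ, List.sum_cons, List.getD_cons_succ]
      have := ih i (by simpa using hi)
      omega

lemma gget_ne_zero_inrange {g : List (List Int)} {y x : Int} (h : gget g y x ≠ 0) :
    y.toNat < g.length ∧ x.toNat < (g.getD y.toNat []).length := by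
  constructor
  · by_contra hy
    rw [Nat.not_lt] at hy
    rw [gget, List.getD_eq_default _ _ hy] at h
    exact h rfl
  · by_contra hx
    rw [Nat.not_lt] at hx
    rw [gget, List.getD_eq_default _ _ hx] at h
    exact h rfl

lemma gridMeasure_mark {g : List (List Int)} {y x : Int}
    (h0 : gget g y x ≠ 0) (h1 : gget g y x ≠ -1) :
    gridMeasure (mark g y x) + 1 = gridMeasure g := by
  obtain ⟨hy, hx⟩ := gget_ne_zero_inrange h0
  unfold gridMeasure mark
  rw [List.map_set]
  have hlen : y.toNat < (g.map (fun r => r.countP (fun v => decide (v ≠ -1)))).length := by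
    simpa using hy
  have hs := sum_set_nat (g.map (fun r => r.countP (fun v => decide (v ≠ -1)))) y.toNat
      (((g.getD y.toNat []).set x.toNat (-1)).countP (fun v => decide (v ≠ -1))) hlen
  have hg : (g.map (fun r => r.countP (fun v => decide (v ≠ -1)))).getD y.toNat 0
      = (g.getD y.toNat []).countP (fun v => decide (v ≠ -1)) := by
    rw [List.getD_eq_getElem _ _ hlen, List.getElem_map,
      List.getD_eq_getElem _ _ hy]
  have hc := countP_set_neg_one (g.getD y.toNat []) x.toNat hx (by simpa [gget] using h1)
  omega

-- A's direction list
def dirsA : List (Int × Int) := [(-1,0),(0,1),(1,0),(0,-1)]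

-- one neighbour check of A's BFS inner `for dy,dx in direction` loop
def stepA (rows cols y x : Int) (gq : List (List Int) × List (Int × Int)) (d : Int × Int) :
    List (List Int) × List (Int × Int) :=
  if 0 ≤ y + d.1 ∧ y + d.1 < rows ∧ 0 ≤ x + d.2 ∧ x + d.2 < cols ∧
      gget gq.1 (y + d.1) (x + d.2) ≠ 0 ∧ gget gq.1 (y + d.1) (x + d.2) ≠ -1 then
    (mark gq.1 (y + d.1) (x + d.2), gq.2 ++ [(y + d.1, x + d.2)])
  else gq

lemma stepA_measure (rows cols y x : Int) (gq : List (List Int) × List (Int × Int))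
    (d : Int × Int) :
    gridMeasure (stepA rows cols y x gq d).1 + (stepA rows cols y x gq d).2.length
      = gridMeasure gq.1 + gq.2.length := by
  unfold stepA
  split_ifs with h
  · obtain ⟨-, -, -, -, h5, h6⟩ := h
    have := gridMeasure_mark h5 h6
    simp only [List.length_append, List.length_cons, List.length_nil]
    omega
  · rfl

lemma foldA_measure (rows cols y x : Int) (ds : List (Int × Int))
    (gq : List (List Int) × List (Int × Int)) :
    gridMeasure (ds.foldl (stepA rows cols y x) gq).1
        + (ds.foldl (stepA rows cols y x) gq).2.length
      = gridMeasure gq.1 + gq.2.length := by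
  induction ds generalizing gq with
  | nil => rfl
  | cons d ds ih => rw [List.foldl_cons, ih, stepA_measure]

-- A's `while queue:` BFS loop; state (land, cnt, col_list)
def bfsA (rows cols : Int) (g : List (List Int)) (q : List (Int × Int)) (cnt : Int)
    (cl : PySem.Set Int) : List (List Int) × Int × PySem.Set Int :=
  match q with
  | [] => (g, cnt, cl)
  | (y, x) :: rest =>
    let gq := dirsA.foldl (stepA rows cols y x) (g, rest)
    bfsA rows cols gq.1 gq.2 (cnt + 1) (cl.add x)
termination_by gridMeasure g + q.length
decreasing_by
  have := foldA_measure rows cols y x dirsA (g, rest)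
  simp only [List.length_cons] at this ⊢
  omega

-- port of A: per-column, per-row seeding; BFS drains the queue, then answer[c] += cnt
def solution (land : List (List Int)) : Int :=
  let rows : Int := land.length
  let cols : Int := (land.headD []).length
  let st := (PySem.List.pyRange 0 cols 1).foldl (fun st col =>
      (PySem.List.pyRange 0 rows 1).foldl (fun (st : List (List Int) × List Int) row =>
        let seeded := if gget st.1 row col = 1 then (mark st.1 row col, [(row, col)])
          else (st.1, ([] : List (Int × Int)))
        let r := bfsA rows cols seeded.1 seeded.2 0 PySem.Set.empty
        -- `for c in col_list: answer[c] += cnt` (additions commute, so set order is irrelevant)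
        let ans := r.2.2.foldl (fun (a : List Int) c => a.set c.toNat (a.getD c.toNat 0 + r.2.1)) st.2
        (r.1, ans)) st)
    (land, List.replicate (land.headD []).length 0)
  st.2.foldl (fun a i => if i > a then i else a) 0

-- ===== PORT B =====
-- one neighbour check of B's `for ny,nx in ((y-1,x),(y,x+1),(y+1,x),(y,x-1))` loop;
-- the stack is held top-first (Python appends/pops at the right end: same LIFO order)
def stepB (rows cols : Int) (gs : List (List Int) × List (Int × Int)) (n : Int × Int) :
    List (List Int) × List (Int × Int) :=
  if 0 ≤ n.1 ∧ n.1 < rows ∧ 0 ≤ n.2 ∧ n.2 < cols ∧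
      ¬(gget gs.1 n.1 n.2 = 0 ∨ gget gs.1 n.1 n.2 = -1) then
    (mark gs.1 n.1 n.2, n :: gs.2)
  else gs

lemma stepB_measure (rows cols : Int) (gs : List (List Int) × List (Int × Int))
    (n : Int × Int) :
    gridMeasure (stepB rows cols gs n).1 + (stepB rows cols gs n).2.length
      = gridMeasure gs.1 + gs.2.length := by
  unfold stepB
  split_ifs with h
  · obtain ⟨-, -, -, -, h5⟩ := h
    rw [not_or] at h5
    have := gridMeasure_mark h5.1 h5.2
    simp only [List.length_cons]
    omega
  · rfl

lemma foldB_measure (rows cols : Int) (ns : List (Int × Int))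
    (gs : List (List Int) × List (Int × Int)) :
    gridMeasure (ns.foldl (stepB rows cols) gs).1
        + (ns.foldl (stepB rows cols) gs).2.length
      = gridMeasure gs.1 + gs.2.length := by
  induction ns generalizing gs with
  | nil => rfl
  | cons n ns ih => rw [List.foldl_cons, ih, stepB_measure]

-- B's `while stack:` DFS loop; collects the popped cells
def dfsB (rows cols : Int) (g : List (List Int)) (st : List (Int × Int))
    (cells : List (Int × Int)) : List (List Int) × List (Int × Int) :=
  match st with
  | [] => (g, cells)
  | (y, x) :: rest =>
    let gs := ([(y - 1, x), (y, x + 1), (y + 1, x), (y, x - 1)]).foldl (stepB rows cols) (g, rest)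
    dfsB rows cols gs.1 gs.2 (cells ++ [(y, x)])
termination_by gridMeasure g + st.length
decreasing_by
  have := foldB_measure rows cols [(y - 1, x), (y, x + 1), (y + 1, x), (y, x - 1)] (g, rest)
  simp only [List.length_cons] at this ⊢
  omega

-- port of B: collect components (size, column set), then per-column sums, then max(, default=0)
def solution_alt (land : List (List Int)) : Int :=
  let rows : Int := land.length
  let cols : Int := (land.headD []).length
  let st := (PySem.List.pyRange 0 cols 1).foldl (fun st c =>
      (PySem.List.pyRange 0 rows 1).foldl
        (fun (st : List (List Int) × List (Int × PySem.Set Int)) r =>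
        if gget st.1 r c = 1 then
          let res := dfsB rows cols (mark st.1 r c) [(r, c)] []
          (res.1, st.2 ++ [((res.2.length : Int), PySem.Set.ofList (res.2.map Prod.snd))])
        else st) st) (land, [])
  PySem.List.maxD ((PySem.List.pyRange 0 cols 1).map (fun c =>
      st.2.foldl (fun s p => if p.2.contains c then s + p.1 else s) 0)) (fun v => v) 0

-- ===== PRECONDITION & SPEC =====
-- Pre_ excludes exactly the inputs on which the Python A raises IndexError: the empty grid
-- (land[0] fails) and grids where some row is shorter than row 0 (land[row][col] fails).
def Pre_solution (land : List (List Int)) : Prop :=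
  land ≠ [] ∧ ∀ row ∈ land, (land.headD []).length ≤ row.length
instance (land : List (List Int)) : Decidable (Pre_solution land) := by
  unfold Pre_solution; infer_instance

def pvWitness_solution : List (List Int) := ([[1, 0], [1, 1]])

def Spec_solution (land : List (List Int)) (out : Int) : Prop := out = solution_alt land
instance (land : List (List Int)) (out : Int) : Decidable (Spec_solution land out) := by
  unfold Spec_solution; infer_instance

-- ===== CLAIM (what is proved, stated in full; the proofs are below) =====
def Claim_equal_solution : Prop :=
  ∀ (land : List (List Int)), Dom_solution land → Pre_solution land →
    Spec_solution land (solution land)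


-- ===== LEMMAS AND PROOFS =====

-- neighbour cells of a cell, in program order
def nbrs (c : Int × Int) : List (Int × Int) :=
  [(c.1 - 1, c.2), (c.1, c.2 + 1), (c.1 + 1, c.2), (c.1, c.2 - 1)]

-- the (identical) push condition of both floods, as a Bool
def condB (rows cols : Int) (g : List (List Int)) (n : Int × Int) : Bool :=
  decide (0 ≤ n.1 ∧ n.1 < rows ∧ 0 ≤ n.2 ∧ n.2 < cols ∧
    gget g n.1 n.2 ≠ 0 ∧ gget g n.1 n.2 ≠ -1)

-- the cells a pop of `c` pushes (and marks), given grid g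
def Fr (rows cols : Int) (g : List (List Int)) (c : Int × Int) : List (Int × Int) :=
  (nbrs c).filter (condB rows cols g)

def markList (g : List (List Int)) (L : List (Int × Int)) : List (List Int) :=
  L.foldl (fun h c => mark h c.1 c.2) g

lemma markList_nil (g : List (List Int)) : markList g [] = g := rfl

lemma markList_cons (g : List (List Int)) (m : Int × Int) (t : List (Int × Int)) :
    markList g (m :: t) = markList (mark g m.1 m.2) t := rfl

lemma markList_append (g : List (List Int)) (L L' : List (Int × Int)) :
    markList (markList g L) L' = markList g (L ++ L') := (List.foldl_append ..).symm

lemma gget_mark {g : List (List Int)} {y x : Int} (h0 : gget g y x ≠ 0) (y' x' : Int) :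
    gget (mark g y x) y' x'
      = if y.toNat = y'.toNat ∧ x.toNat = x'.toNat then (-1) else gget g y' x' := by
  obtain ⟨hy, hx⟩ := gget_ne_zero_inrange h0
  unfold gget mark
  by_cases hyy : y.toNat = y'.toNat
  · rw [← hyy]
    have hrow : ((g.set y.toNat ((g.getD y.toNat []).set x.toNat (-1))).getD y.toNat [])
        = (g.getD y.toNat []).set x.toNat (-1) := by
      rw [List.getD_eq_getElem _ _ (by simpa using hy)]
      simp [hy]
    rw [hrow]
    by_cases hxx : x.toNat = x'.toNat
    · rw [← hxx, List.getD_eq_getElem _ _ (by simpa using hx)]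
      simp [hyy, hxx]
    · simp only [hyy, hxx, and_false, if_false, true_and, if_neg hxx]
      simp [List.getD, List.getElem?_set_ne hxx]
  · simp only [if_neg (by tauto : ¬(y.toNat = y'.toNat ∧ x.toNat = x'.toNat))]
    simp [List.getD, List.getElem?_set_ne hyy]

-- membership in Fr, unpacked
lemma mem_Fr {rows cols : Int} {g : List (List Int)} {c n : Int × Int} :
    n ∈ Fr rows cols g c ↔ n ∈ nbrs c ∧ 0 ≤ n.1 ∧ n.1 < rows ∧ 0 ≤ n.2 ∧ n.2 < cols ∧
      gget g n.1 n.2 ≠ 0 ∧ gget g n.1 n.2 ≠ -1 := by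
  simp [Fr, condB, List.mem_filter]

lemma nodup_nbrs (c : Int × Int) : (nbrs c).Nodup := by
  simp [nbrs, Prod.ext_iff]
  omega

lemma nodup_Fr (rows cols : Int) (g : List (List Int)) (c : Int × Int) :
    (Fr rows cols g c).Nodup := (nodup_nbrs c).filter _

-- two nonneg cells are equal iff their toNat projections agree
lemma cell_eq_iff {a b : Int × Int} (ha1 : 0 ≤ a.1) (ha2 : 0 ≤ a.2) (hb1 : 0 ≤ b.1)
    (hb2 : 0 ≤ b.2) : (a.1.toNat = b.1.toNat ∧ a.2.toNat = b.2.toNat) ↔ a = b := by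
  rw [Prod.ext_iff]
  omega

lemma gget_markList {g : List (List Int)} {L : List (Int × Int)}
    (hL : ∀ m ∈ L, 0 ≤ m.1 ∧ 0 ≤ m.2 ∧ gget g m.1 m.2 ≠ 0) {y x : Int}
    (hy : 0 ≤ y) (hx : 0 ≤ x) :
    gget (markList g L) y x = if (y, x) ∈ L then -1 else gget g y x := by
  induction L generalizing g with
  | nil => simp [markList_nil]
  | cons m t ih =>
    obtain ⟨m1, m2⟩ := m
    obtain ⟨hm1, hm2, hm0⟩ := hL (m1, m2) (List.mem_cons_self ..)
    rw [markList_cons]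
    have ht : ∀ m' ∈ t, 0 ≤ m'.1 ∧ 0 ≤ m'.2 ∧ gget (mark g m1 m2) m'.1 m'.2 ≠ 0 := by
      intro m' hm'
      obtain ⟨h1, h2, h0⟩ := hL m' (List.mem_cons_of_mem _ hm')
      refine ⟨h1, h2, ?_⟩
      rw [gget_mark hm0]
      split_ifs <;> simp_all
    rw [ih ht, gget_mark hm0 y x]
    have hiff : (m1.toNat = y.toNat ∧ m2.toNat = x.toNat) ↔ (y, x) = (m1, m2) := by
      simp only [Prod.mk.injEq]
      simp at hm1 hm2
      omega
    by_cases hmem : (y, x) ∈ t <;> by_cases heq : ((y, x) : Int × Int) = (m1, m2) <;>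
      simp [hmem, heq, hiff, List.mem_cons]

-- marking a list of currently-unmarked real cells decreases the measure by its length
lemma gridMeasure_markList {g : List (List Int)} {L : List (Int × Int)}
    (hL : ∀ m ∈ L, 0 ≤ m.1 ∧ 0 ≤ m.2 ∧ gget g m.1 m.2 ≠ 0 ∧ gget g m.1 m.2 ≠ -1)
    (hnd : L.Nodup) :
    gridMeasure g = gridMeasure (markList g L) + L.length := by
  induction L generalizing g with
  | nil => simp [markList_nil]
  | cons m t ih =>
    obtain ⟨hm1, hm2, hm0, hmm⟩ := hL m (List.mem_cons_self ..)
    rw [markList_cons]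
    have ht : ∀ m' ∈ t, 0 ≤ m'.1 ∧ 0 ≤ m'.2 ∧ gget (mark g m.1 m.2) m'.1 m'.2 ≠ 0 ∧
        gget (mark g m.1 m.2) m'.1 m'.2 ≠ -1 := by
      intro m' hm'
      obtain ⟨h1, h2, h0, hh⟩ := hL m' (List.mem_cons_of_mem _ hm')
      have hne : ¬(m.1.toNat = m'.1.toNat ∧ m.2.toNat = m'.2.toNat) := by
        rw [cell_eq_iff hm1 hm2 h1 h2]
        rintro rfl
        exact (List.nodup_cons.mp hnd).1 hm'
      refine ⟨h1, h2, ?_⟩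
      rw [gget_mark hm0, if_neg hne]
      exact ⟨h0, hh⟩
    have := ih ht (List.nodup_cons.mp hnd).2
    have := gridMeasure_mark hm0 hmm
    simp only [List.length_cons]
    omega

-- marks at in-range positions commute (as list-set operations)
lemma mark_comm {g : List (List Int)} {a b : Int × Int}
    (ha : gget g a.1 a.2 ≠ 0) (hb : gget g b.1 b.2 ≠ 0) :
    mark (mark g a.1 a.2) b.1 b.2 = mark (mark g b.1 b.2) a.1 a.2 := by
  obtain ⟨hya, hxa⟩ := gget_ne_zero_inrange ha
  obtain ⟨hyb, hxb⟩ := gget_ne_zero_inrange hb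
  unfold mark
  by_cases hy : a.1.toNat = b.1.toNat
  · rw [← hy] at *
    by_cases hx : a.2.toNat = b.2.toNat
    · rw [← hx]
    · have h1 : ∀ (r : List Int),
          ((g.set a.1.toNat r).getD a.1.toNat []) = r := fun r => by
        rw [List.getD_eq_getElem _ _ (by simpa using hya)]
        simp
      rw [h1, h1, List.set_set, List.set_set, List.set_comm _ _ hx]
  · have h2 : ∀ (r : List Int) (i : Nat) (hne : a.1.toNat ≠ i),
        ((g.set a.1.toNat r).getD i []) = g.getD i [] := fun r i hne => by
      simp [List.getD, List.getElem?_set_ne hne]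
    rw [h2 _ _ (by omega), List.set_comm _ _ hy]
    congr 1
    simp [List.getD, List.getElem?_set_ne (by omega : b.1.toNat ≠ a.1.toNat)]

-- markList is invariant under permutation of real-cell lists
lemma markList_perm {L L' : List (Int × Int)} (h : L.Perm L') :
    ∀ g : List (List Int), (∀ m ∈ L, 0 ≤ m.1 ∧ 0 ≤ m.2 ∧ gget g m.1 m.2 ≠ 0) →
    markList g L = markList g L' := by
  induction h with
  | nil => intro g _; rfl
  | cons m h ih =>
    intro g hL
    rw [markList_cons, markList_cons]
    apply ih
    intro m' hm'
    obtain ⟨h1, h2, h0⟩ := hL m' (List.mem_cons_of_mem _ hm')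
    refine ⟨h1, h2, ?_⟩
    rw [gget_mark (hL m (List.mem_cons_self ..)).2.2]
    split_ifs <;> simp_all
  | swap a b l =>
    intro g hL
    rw [markList_cons, markList_cons, markList_cons, markList_cons,
      mark_comm (hL a (by simp)).2.2 (hL b (by simp)).2.2]
  | trans h1 h2 ih1 ih2 =>
    intro g hL
    rw [ih1 g hL]
    apply ih2
    intro m hm
    exact hL m (h1.symm.mem_iff.mp hm)

-- condition after marking a list: same condition, and not marked
lemma condB_markList {rows cols : Int} {g : List (List Int)} {L : List (Int × Int)}
    (hL : ∀ m ∈ L, 0 ≤ m.1 ∧ 0 ≤ m.2 ∧ gget g m.1 m.2 ≠ 0) (n : Int × Int) :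
    condB rows cols (markList g L) n = (condB rows cols g n && !(decide (n ∈ L))) := by
  by_cases hbnd : 0 ≤ n.1 ∧ n.1 < rows ∧ 0 ≤ n.2 ∧ n.2 < cols
  · have hg := gget_markList hL hbnd.1 hbnd.2.2.1
    by_cases hmem : (n.1, n.2) ∈ L
    · have : gget (markList g L) n.1 n.2 = -1 := by rw [hg, if_pos hmem]
      simp [condB, this, hmem]
    · have : gget (markList g L) n.1 n.2 = gget g n.1 n.2 := by rw [hg, if_neg hmem]
      simp [condB, this, hmem]
  · simp only [condB]
    rw [decide_eq_false (by tauto), decide_eq_false (by tauto)]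
    simp

lemma Fr_markList {rows cols : Int} {g : List (List Int)} {L : List (Int × Int)}
    (hL : ∀ m ∈ L, 0 ≤ m.1 ∧ 0 ≤ m.2 ∧ gget g m.1 m.2 ≠ 0) (c : Int × Int) :
    Fr rows cols (markList g L) c
      = (Fr rows cols g c).filter (fun n => !(decide (n ∈ L))) := by
  unfold Fr
  rw [List.filter_filter]
  apply List.filter_congr
  intro n _
  rw [condB_markList hL]
  exact Bool.and_comm ..

-- properties of Fr's members w.r.t. its own grid
lemma Fr_props {rows cols : Int} {g : List (List Int)} {c : Int × Int} :
    ∀ m ∈ Fr rows cols g c, 0 ≤ m.1 ∧ 0 ≤ m.2 ∧ gget g m.1 m.2 ≠ 0 := by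
  intro m hm
  have := mem_Fr.mp hm
  tauto

lemma Fr_props' {rows cols : Int} {g : List (List Int)} {c : Int × Int} :
    ∀ m ∈ Fr rows cols g c,
      0 ≤ m.1 ∧ 0 ≤ m.2 ∧ gget g m.1 m.2 ≠ 0 ∧ gget g m.1 m.2 ≠ -1 := by
  intro m hm
  have := mem_Fr.mp hm
  tauto

-- union of two nodup lists, written in either order, is a permutation
lemma union_perm {A B : List (Int × Int)} (hA : A.Nodup) (hB : B.Nodup) :
    (A ++ B.filter (fun n => !(decide (n ∈ A)))).Perm
      (B ++ A.filter (fun n => !(decide (n ∈ B)))) := by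
  apply (List.perm_ext_iff_of_nodup ?_ ?_).mpr
  · intro a
    simp only [List.mem_append, List.mem_filter, Bool.not_eq_eq_eq_not, Bool.not_true,
      decide_eq_false_iff_not]
    tauto
  · exact hA.append (hB.filter _) (by intro a ha hb; simp at hb; exact hb.2 ha)
  · exact hB.append (hA.filter _) (by intro a ha hb; simp at hb; exact hb.2 ha)

-- cell-level form of A's neighbour step
def stepC (rows cols : Int) (gq : List (List Int) × List (Int × Int)) (n : Int × Int) :
    List (List Int) × List (Int × Int) :=
  if 0 ≤ n.1 ∧ n.1 < rows ∧ 0 ≤ n.2 ∧ n.2 < cols ∧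
      gget gq.1 n.1 n.2 ≠ 0 ∧ gget gq.1 n.1 n.2 ≠ -1 then
    (mark gq.1 n.1 n.2, gq.2 ++ [n])
  else gq

lemma condB_true_iff {rows cols : Int} {g : List (List Int)} {n : Int × Int} :
    condB rows cols g n = true ↔ (0 ≤ n.1 ∧ n.1 < rows ∧ 0 ≤ n.2 ∧ n.2 < cols ∧
      gget g n.1 n.2 ≠ 0 ∧ gget g n.1 n.2 ≠ -1) := by
  simp [condB]

-- after the marking step, the condition of a different (nodup-later) cell is unchanged
lemma condB_mark {rows cols : Int} {g : List (List Int)} {n m : Int × Int}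
    (hc : condB rows cols g n = true) (hne : n ≠ m) :
    condB rows cols (mark g n.1 n.2) m = condB rows cols g m := by
  obtain ⟨h1, h2, h3, h4, h5, h6⟩ := condB_true_iff.mp hc
  by_cases hb : 0 ≤ m.1 ∧ m.1 < rows ∧ 0 ≤ m.2 ∧ m.2 < cols
  · have hnats : ¬(n.1.toNat = m.1.toNat ∧ n.2.toNat = m.2.toNat) := by
      rw [cell_eq_iff h1 h3 hb.1 hb.2.2.1]
      exact hne
    have hg : gget (mark g n.1 n.2) m.1 m.2 = gget g m.1 m.2 := by
      rw [gget_mark h5, if_neg hnats]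
    unfold condB
    rw [hg]
  · unfold condB
    rw [decide_eq_false (by tauto), decide_eq_false (by tauto)]

lemma foldl_stepC (rows cols : Int) : ∀ (ns : List (Int × Int)) (g : List (List Int))
    (q : List (Int × Int)), ns.Nodup →
    ns.foldl (stepC rows cols) (g, q)
      = (markList g (ns.filter (condB rows cols g)),
         q ++ ns.filter (condB rows cols g)) := by
  intro ns
  induction ns with
  | nil => intro g q _; simp [markList_nil]
  | cons n t ih =>
    intro g q hnd
    rw [List.foldl_cons]
    by_cases hc : condB rows cols g n = true
    · have hstep : stepC rows cols (g, q) n = (mark g n.1 n.2, q ++ [n]) := by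
        unfold stepC
        rw [if_pos (condB_true_iff.mp hc)]
      rw [hstep, ih _ _ (List.nodup_cons.mp hnd).2]
      have hfe : t.filter (condB rows cols (mark g n.1 n.2)) = t.filter (condB rows cols g) := by
        apply List.filter_congr
        intro m hm
        exact condB_mark hc (fun h => (List.nodup_cons.mp hnd).1 (h ▸ hm))
      rw [hfe, List.filter_cons_of_pos hc, markList_cons]
      simp
    · have hstep : stepC rows cols (g, q) n = (g, q) := by
        unfold stepC
        rw [if_neg (fun h => hc (condB_true_iff.mpr h))]
      rw [hstep, ih _ _ (List.nodup_cons.mp hnd).2,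
        List.filter_cons_of_neg (by simpa using hc)]

lemma foldl_stepB (rows cols : Int) : ∀ (ns : List (Int × Int)) (g : List (List Int))
    (st : List (Int × Int)), ns.Nodup →
    ns.foldl (stepB rows cols) (g, st)
      = (markList g (ns.filter (condB rows cols g)),
         (ns.filter (condB rows cols g)).reverse ++ st) := by
  intro ns
  induction ns with
  | nil => intro g st _; simp [markList_nil]
  | cons n t ih =>
    intro g st hnd
    rw [List.foldl_cons]
    by_cases hc : condB rows cols g n = true
    · have hstep : stepB rows cols (g, st) n = (mark g n.1 n.2, n :: st) := by
        unfold stepB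
        rw [if_pos]
        have := condB_true_iff.mp hc
        tauto
      rw [hstep, ih _ _ (List.nodup_cons.mp hnd).2]
      have hfe : t.filter (condB rows cols (mark g n.1 n.2)) = t.filter (condB rows cols g) := by
        apply List.filter_congr
        intro m hm
        exact condB_mark hc (fun h => (List.nodup_cons.mp hnd).1 (h ▸ hm))
      rw [hfe, List.filter_cons_of_pos hc, markList_cons]
      simp
    · have hstep : stepB rows cols (g, st) n = (g, st) := by
        unfold stepB
        rw [if_neg]
        intro h
        exact hc (condB_true_iff.mpr (by tauto))
      rw [hstep, ih _ _ (List.nodup_cons.mp hnd).2,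
        List.filter_cons_of_neg (by simpa using hc)]

-- one-step unfoldings of the two flood loops
lemma bfsA_cons (rows cols : Int) (g : List (List Int)) (y x : Int)
    (rest : List (Int × Int)) (cnt : Int) (cl : PySem.Set Int) :
    bfsA rows cols g ((y, x) :: rest) cnt cl
      = bfsA rows cols (markList g (Fr rows cols g (y, x)))
          (rest ++ Fr rows cols g (y, x)) (cnt + 1) (cl.add x) := by
  rw [bfsA]
  have hmap : dirsA.foldl (stepA rows cols y x) (g, rest)
      = (nbrs (y, x)).foldl (stepC rows cols) (g, rest) := by
    have : nbrs (y, x) = dirsA.map (fun d => (y + d.1, x + d.2)) := by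
      simp [dirsA, nbrs, sub_eq_add_neg]
    rw [this, List.foldl_map]
    rfl
  rw [hmap, foldl_stepC rows cols _ _ _ (nodup_nbrs (y, x))]
  rfl

lemma dfsB_cons (rows cols : Int) (g : List (List Int)) (y x : Int)
    (rest : List (Int × Int)) (cells : List (Int × Int)) :
    dfsB rows cols g ((y, x) :: rest) cells
      = dfsB rows cols (markList g (Fr rows cols g (y, x)))
          ((Fr rows cols g (y, x)).reverse ++ rest) (cells ++ [(y, x)]) := by
  rw [dfsB]
  have : ([(y - 1, x), (y, x + 1), (y + 1, x), (y, x - 1)] : List (Int × Int))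
      = nbrs (y, x) := rfl
  rw [this, foldl_stepB rows cols _ _ _ (nodup_nbrs (y, x))]
  rfl

-- result relation for bfsA: same grid, same count, same column set
def relA (r s : List (List Int) × Int × PySem.Set Int) : Prop :=
  r.1 = s.1 ∧ r.2.1 = s.2.1 ∧ ∀ z, z ∈ r.2.2 ↔ z ∈ s.2.2

lemma relA_symm {r s} (h : relA r s) : relA s r :=
  ⟨h.1.symm, h.2.1.symm, fun z => (h.2.2 z).symm⟩

lemma relA_trans {r s t} (h1 : relA r s) (h2 : relA s t) : relA r t :=
  ⟨h1.1.trans h2.1, h1.2.1.trans h2.2.1, fun z => (h1.2.2 z).trans (h2.2.2 z)⟩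

-- S1: the BFS result does not depend on the order of the worklist
lemma bfsA_perm (rows cols : Int) : ∀ (n : Nat) (g : List (List Int))
    (q q' : List (Int × Int)) (cnt : Int) (cl cl' : PySem.Set Int),
    gridMeasure g + q.length ≤ n → q.Perm q' → (∀ z, z ∈ cl ↔ z ∈ cl') →
    relA (bfsA rows cols g q cnt cl) (bfsA rows cols g q' cnt cl') := by
  intro n
  induction n with
  | zero =>
    intro g q q' cnt cl cl' hn hperm hcl
    have hq : q = [] := List.eq_nil_of_length_eq_zero (by omega)
    subst hq
    have hq' : q' = [] := hperm.symm.eq_nil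
    subst hq'
    rw [bfsA, bfsA]
    exact ⟨rfl, rfl, hcl⟩
  | succ n ih =>
    intro g q q' cnt cl cl' hn hperm hcl
    cases q with
    | nil =>
      have hq' : q' = [] := hperm.symm.eq_nil
      subst hq'
      rw [bfsA, bfsA]
      exact ⟨rfl, rfl, hcl⟩
    | cons a t =>
      obtain ⟨y, x⟩ := a
      cases q' with
      | nil => exact absurd hperm.eq_nil (by simp)
      | cons b t' =>
        obtain ⟨b1, b2⟩ := b
        have hmFa := gridMeasure_markList (Fr_props' (rows := rows) (cols := cols)
          (g := g) (c := (y, x))) (nodup_Fr rows cols g (y, x))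
        by_cases hab : ((y, x) : Int × Int) = (b1, b2)
        · rw [← hab] at hperm ⊢
          have ht : t.Perm t' := hperm.cons_inv
          rw [bfsA_cons, bfsA_cons]
          apply ih
          · simp only [List.length_append, List.length_cons] at hn ⊢
            omega
          · exact ht.append_right _
          · intro z
            simp [PySem.Set.mem_add, hcl z]
        · -- different heads: pop both, in either order
          have hbq : ((b1, b2) : Int × Int) ∈ t := by
            have h0 : ((b1, b2) : Int × Int) ∈ (y, x) :: t :=
              hperm.mem_iff.mpr (List.mem_cons_self ..)
            rcases List.mem_cons.mp h0 with h | h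
            · exact absurd h.symm hab
            · exact h
          have hat' : ((y, x) : Int × Int) ∈ t' := by
            have h0 : ((y, x) : Int × Int) ∈ (b1, b2) :: t' :=
              hperm.mem_iff.mp (List.mem_cons_self ..)
            rcases List.mem_cons.mp h0 with h | h
            · exact absurd h hab
            · exact h
          have htt : t.Perm ((b1, b2) :: t'.erase (y, x)) := by
            have h1 : ((y, x) :: t).erase (y, x) = t := List.erase_cons_head ..
            have hne : ((b1, b2) : Int × Int) ≠ (y, x) := fun h => hab h.symm
            have h2 : (((b1, b2) : Int × Int) :: t').erase (y, x)
                = (b1, b2) :: t'.erase (y, x) := by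
              simp [hne]
            have hp := hperm.erase (y, x)
            rw [h1, h2] at hp
            exact hp
          have htt' : (t.erase (b1, b2)).Perm (t'.erase (y, x)) := by
            have hp := htt.erase (b1, b2)
            rw [List.erase_cons_head] at hp
            exact hp
          have hmFb := gridMeasure_markList (Fr_props' (rows := rows) (cols := cols)
            (g := g) (c := (b1, b2))) (nodup_Fr rows cols g (b1, b2))
          rw [bfsA_cons, bfsA_cons]
          -- LHS: move (b1,b2) to the front and pop it
          have e1 : relA
              (bfsA rows cols (markList g (Fr rows cols g (y, x)))
                (t ++ Fr rows cols g (y, x)) (cnt + 1) (cl.add x))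
              (bfsA rows cols (markList g (Fr rows cols g (y, x)))
                ((b1, b2) :: (t.erase (b1, b2) ++ Fr rows cols g (y, x)))
                (cnt + 1) (cl.add x)) := by
            apply ih
            · simp only [List.length_append, List.length_cons] at hn ⊢
              omega
            · simpa using (List.perm_cons_erase hbq).append_right (Fr rows cols g (y, x))
            · intro z; exact Iff.rfl
          rw [bfsA_cons] at e1
          -- RHS: move (y,x) to the front and pop it
          have e2 : relA
              (bfsA rows cols (markList g (Fr rows cols g (b1, b2)))
                (t' ++ Fr rows cols g (b1, b2)) (cnt + 1) (cl'.add b2))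
              (bfsA rows cols (markList g (Fr rows cols g (b1, b2)))
                ((y, x) :: (t'.erase (y, x) ++ Fr rows cols g (b1, b2)))
                (cnt + 1) (cl'.add b2)) := by
            apply ih
            · have := hperm.length_eq
              simp only [List.length_append, List.length_cons] at hn this ⊢
              omega
            · simpa using (List.perm_cons_erase hat').append_right (Fr rows cols g (b1, b2))
            · intro z; exact Iff.rfl
          rw [bfsA_cons] at e2
          -- frontiers of the second pops
          have hF1b : Fr rows cols (markList g (Fr rows cols g (y, x))) (b1, b2)
              = (Fr rows cols g (b1, b2)).filter
                  (fun m => !(decide (m ∈ Fr rows cols g (y, x)))) :=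
            Fr_markList Fr_props _
          have hF2a : Fr rows cols (markList g (Fr rows cols g (b1, b2))) (y, x)
              = (Fr rows cols g (y, x)).filter
                  (fun m => !(decide (m ∈ Fr rows cols g (b1, b2)))) :=
            Fr_markList Fr_props _
          have hu := union_perm (nodup_Fr rows cols g (y, x)) (nodup_Fr rows cols g (b1, b2))
          have hgrids : markList (markList g (Fr rows cols g (y, x)))
                (Fr rows cols (markList g (Fr rows cols g (y, x))) (b1, b2))
              = markList (markList g (Fr rows cols g (b1, b2)))
                (Fr rows cols (markList g (Fr rows cols g (b1, b2))) (y, x)) := by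
            rw [hF1b, hF2a, markList_append, markList_append]
            apply markList_perm hu
            intro m hm
            rcases List.mem_append.mp hm with h | h
            · exact Fr_props m h
            · exact Fr_props m (List.mem_filter.mp h).1
          -- measures of the second frontiers
          have hm1b := gridMeasure_markList
            (Fr_props' (g := markList g (Fr rows cols g (y, x))) (c := (b1, b2)))
            (nodup_Fr rows cols _ (b1, b2))
          have e3 : relA
              (bfsA rows cols (markList (markList g (Fr rows cols g (y, x)))
                  (Fr rows cols (markList g (Fr rows cols g (y, x))) (b1, b2)))
                ((t.erase (b1, b2) ++ Fr rows cols g (y, x))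
                  ++ Fr rows cols (markList g (Fr rows cols g (y, x))) (b1, b2))
                (cnt + 1 + 1) ((cl.add x).add b2))
              (bfsA rows cols (markList (markList g (Fr rows cols g (b1, b2)))
                  (Fr rows cols (markList g (Fr rows cols g (b1, b2))) (y, x)))
                ((t'.erase (y, x) ++ Fr rows cols g (b1, b2))
                  ++ Fr rows cols (markList g (Fr rows cols g (b1, b2))) (y, x))
                (cnt + 1 + 1) ((cl'.add b2).add x)) := by
            rw [← hgrids]
            apply ih
            · have hle : (t.erase (b1, b2)).length + 1 = t.length :=
                List.length_erase_add_one hbq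
              simp only [List.length_append, List.length_cons] at hn ⊢
              omega
            · rw [hF1b, hF2a, List.append_assoc, List.append_assoc]
              exact htt'.append hu
            · intro z
              simp [PySem.Set.mem_add, hcl z]
              tauto
          exact relA_trans e1 (relA_trans e3 (relA_symm e2))

-- S2: DFS agrees with BFS: same final grid, and the popped cells P determine cnt/col_list
lemma dfsB_bfsA (rows cols : Int) : ∀ (n : Nat) (g : List (List Int))
    (q q' : List (Int × Int)) (cells : List (Int × Int)) (cnt : Int) (cl : PySem.Set Int),
    gridMeasure g + q.length ≤ n → q.Perm q' →
    (∀ c ∈ q, 0 ≤ c.1 ∧ c.1 < rows ∧ 0 ≤ c.2 ∧ c.2 < cols) →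
    (bfsA rows cols g q cnt cl).1 = (dfsB rows cols g q' cells).1 ∧
    ∃ P : List (Int × Int), (dfsB rows cols g q' cells).2 = cells ++ P ∧
      (bfsA rows cols g q cnt cl).2.1 = cnt + P.length ∧
      (∀ z, z ∈ (bfsA rows cols g q cnt cl).2.2 ↔ z ∈ cl ∨ z ∈ P.map Prod.snd) ∧
      (∀ c ∈ P, 0 ≤ c.1 ∧ c.1 < rows ∧ 0 ≤ c.2 ∧ c.2 < cols) := by
  intro n
  induction n with
  | zero =>
    intro g q q' cells cnt cl hn hperm hq
    have h0 : q = [] := List.eq_nil_of_length_eq_zero (by omega)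
    subst h0
    have h1 : q' = [] := hperm.symm.eq_nil
    subst h1
    rw [bfsA, dfsB]
    exact ⟨rfl, [], by simp, by simp, fun z => by simp, by simp⟩
  | succ n ih =>
    intro g q q' cells cnt cl hn hperm hq
    cases q' with
    | nil =>
      have h0 : q = [] := hperm.eq_nil
      subst h0
      rw [bfsA, dfsB]
      exact ⟨rfl, [], by simp, by simp, fun z => by simp, by simp⟩
    | cons b t' =>
      obtain ⟨b1, b2⟩ := b
      have hbq : ((b1, b2) : Int × Int) ∈ q := hperm.mem_iff.mpr (List.mem_cons_self ..)
      have hqp : q.Perm ((b1, b2) :: q.erase (b1, b2)) := List.perm_cons_erase hbq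
      have hS1 := bfsA_perm rows cols (n + 1) g q ((b1, b2) :: q.erase (b1, b2)) cnt cl cl
        hn hqp (fun z => Iff.rfl)
      rw [bfsA_cons] at hS1
      rw [dfsB_cons]
      have hqe : (q.erase (b1, b2)).Perm t' := by
        have hp := hperm.erase (b1, b2)
        rw [List.erase_cons_head] at hp
        exact hp
      have hperm2 : (q.erase (b1, b2) ++ Fr rows cols g (b1, b2)).Perm
          ((Fr rows cols g (b1, b2)).reverse ++ t') :=
        ((hqe.append_right _).trans List.perm_append_comm).trans
          (((Fr rows cols g (b1, b2)).reverse_perm).symm.append_right t')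
      have hmF := gridMeasure_markList (Fr_props' (rows := rows) (cols := cols)
        (g := g) (c := (b1, b2))) (nodup_Fr rows cols g (b1, b2))
      have hlen : (q.erase (b1, b2)).length + 1 = q.length := List.length_erase_add_one hbq
      have hbnds : ∀ c ∈ q.erase (b1, b2) ++ Fr rows cols g (b1, b2),
          0 ≤ c.1 ∧ c.1 < rows ∧ 0 ≤ c.2 ∧ c.2 < cols := by
        intro c hc
        rcases List.mem_append.mp hc with h | h
        · exact hq c (List.mem_of_mem_erase h)
        · have := mem_Fr.mp h
          tauto
      obtain ⟨hg, P', hcells, hcnt, hmem, hbP⟩ := ih (markList g (Fr rows cols g (b1, b2)))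
        (q.erase (b1, b2) ++ Fr rows cols g (b1, b2))
        ((Fr rows cols g (b1, b2)).reverse ++ t') (cells ++ [(b1, b2)]) (cnt + 1)
        (cl.add b2)
        (by simp only [List.length_append]; omega)
        hperm2 hbnds
      refine ⟨?_, (b1, b2) :: P', ?_, ?_, ?_, ?_⟩
      · rw [hS1.1, hg]
      · rw [hcells]
        simp
      · rw [hS1.2.1, hcnt]
        simp only [List.length_cons]
        push_cast
        ring
      · intro z
        rw [hS1.2.2 z, hmem z]
        simp only [PySem.Set.mem_add, List.map_cons, List.mem_cons]
        tauto
      · intro c hc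
        rcases List.mem_cons.mp hc with h | h
        · exact h ▸ hq _ hbq
        · exact hbP c h

lemma bfsA_cl_nodup (rows cols : Int) : ∀ (n : Nat) (g : List (List Int))
    (q : List (Int × Int)) (cnt : Int) (cl : PySem.Set Int),
    gridMeasure g + q.length ≤ n → cl.Nodup →
    (bfsA rows cols g q cnt cl).2.2.Nodup := by
  intro n
  induction n with
  | zero =>
    intro g q cnt cl hn hcl
    have h0 : q = [] := List.eq_nil_of_length_eq_zero (by omega)
    subst h0
    rw [bfsA]
    exact hcl
  | succ n ih =>
    intro g q cnt cl hn hcl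
    cases q with
    | nil => rw [bfsA]; exact hcl
    | cons a t =>
      obtain ⟨y, x⟩ := a
      have hmF := gridMeasure_markList (Fr_props' (rows := rows) (cols := cols)
        (g := g) (c := (y, x))) (nodup_Fr rows cols g (y, x))
      rw [bfsA_cons]
      apply ih
      · simp only [List.length_append, List.length_cons] at hn ⊢
        omega
      · exact PySem.Set.nodup_add cl x hcl

-- ===== outer-loop correspondence =====

-- B's per-column aggregate over its components list
def colSumsF (comps : List (Int × PySem.Set Int)) (c : Int) : Int :=
  comps.foldl (fun s p => if p.2.contains c then s + p.1 else s) 0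

-- the two per-row loop bodies, as named functions (definitionally the ports' lambdas)
def bodyA (rows cols col : Int) (st : List (List Int) × List Int) (row : Int) :
    List (List Int) × List Int :=
  let seeded := if gget st.1 row col = 1 then (mark st.1 row col, [(row, col)])
    else (st.1, ([] : List (Int × Int)))
  let r := bfsA rows cols seeded.1 seeded.2 0 PySem.Set.empty
  let ans := r.2.2.foldl (fun (a : List Int) c => a.set c.toNat (a.getD c.toNat 0 + r.2.1)) st.2
  (r.1, ans)

def bodyB (rows cols c : Int) (st : List (List Int) × List (Int × PySem.Set Int)) (r : Int) :
    List (List Int) × List (Int × PySem.Set Int) :=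
  if gget st.1 r c = 1 then
    let res := dfsB rows cols (mark st.1 r c) [(r, c)] []
    (res.1, st.2 ++ [((res.2.length : Int), PySem.Set.ofList (res.2.map Prod.snd))])
  else st

lemma colSumsF_snoc (comps : List (Int × PySem.Set Int)) (p : Int × PySem.Set Int) (c : Int) :
    colSumsF (comps ++ [p]) c = colSumsF comps c + (if p.2.contains c then p.1 else 0) := by
  unfold colSumsF
  rw [List.foldl_append]
  simp only [List.foldl_cons, List.foldl_nil]
  split_ifs <;> simp

lemma colSumsF_nonneg (comps : List (Int × PySem.Set Int)) (h : ∀ p ∈ comps, 0 ≤ p.1)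
    (c : Int) : 0 ≤ colSumsF comps c := by
  suffices haux : ∀ s : Int, 0 ≤ s →
      0 ≤ comps.foldl (fun s p => if p.2.contains c then s + p.1 else s) s from haux 0 le_rfl
  induction comps with
  | nil => intro s hs; simpa using hs
  | cons p t ih =>
    intro s hs
    rw [List.foldl_cons]
    have hp := h p (List.mem_cons_self ..)
    refine ih (fun p hp => h p (List.mem_cons_of_mem _ hp)) _ ?_
    split_ifs with hcn
    · exact add_nonneg hs hp
    · exact hs

lemma getD_set_self (l : List Int) (i : Nat) (v : Int) (h : i < l.length) :
    (l.set i v).getD i 0 = v := by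
  rw [List.getD_eq_getElem _ _ (by simpa using h)]
  simp

-- the `for c in col_list: answer[c] += cnt` fold, characterized pointwise
lemma fold_set_add (cnt : Int) : ∀ (L : List Int) (a : List Int), L.Nodup →
    (∀ c ∈ L, 0 ≤ c) →
    (L.foldl (fun a c => a.set c.toNat (a.getD c.toNat 0 + cnt)) a).length = a.length ∧
    ∀ k, k < a.length →
      (L.foldl (fun a c => a.set c.toNat (a.getD c.toNat 0 + cnt)) a).getD k 0
        = a.getD k 0 + (if (k : Int) ∈ L then cnt else 0) := by
  intro L
  induction L with
  | nil => intro a _ _; exact ⟨rfl, fun k hk => by simp⟩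
  | cons c t ih =>
    intro a hnd hpos
    have hc0 : 0 ≤ c := hpos c (List.mem_cons_self ..)
    have hlen1 : (a.set c.toNat (a.getD c.toNat 0 + cnt)).length = a.length := by simp
    obtain ⟨hl, hk⟩ := ih (a.set c.toNat (a.getD c.toNat 0 + cnt))
      (List.nodup_cons.mp hnd).2 (fun c' h => hpos c' (List.mem_cons_of_mem _ h))
    constructor
    · rw [List.foldl_cons, hl, hlen1]
    · intro k hkk
      rw [List.foldl_cons, hk k (by omega)]
      by_cases hck : c.toNat = k
      · have hceq : c = (k : Int) := by omega
        have hmem_t : ((k : Int)) ∉ t := hceq ▸ (List.nodup_cons.mp hnd).1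
        have hset : (a.set c.toNat (a.getD c.toNat 0 + cnt)).getD k 0 = a.getD k 0 + cnt := by
          rw [← hck, getD_set_self _ _ _ (by omega), hck]
        rw [hset, if_neg hmem_t, if_pos (List.mem_cons.mpr (Or.inl hceq.symm))]
        omega
      · have hset : (a.set c.toNat (a.getD c.toNat 0 + cnt)).getD k 0 = a.getD k 0 := by
          simp [List.getD, List.getElem?_set_ne hck]
        have hkc : ((k : Int)) ≠ c := by omega
        rw [hset]
        simp only [List.mem_cons, hkc, false_or]

-- one seeding/flooding step preserves the state correspondence
lemma body_step (rows cols col row : Int) (hcol : 0 ≤ col ∧ col < cols)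
    (hrow : 0 ≤ row ∧ row < rows) (g : List (List Int)) (ans : List Int)
    (comps : List (Int × PySem.Set Int))
    (hans : ans = (PySem.List.pyRange 0 cols 1).map (colSumsF comps))
    (hpos : ∀ p ∈ comps, 0 ≤ p.1) :
    (bodyA rows cols col (g, ans) row).1 = (bodyB rows cols col (g, comps) row).1 ∧
    (bodyA rows cols col (g, ans) row).2
      = (PySem.List.pyRange 0 cols 1).map (colSumsF (bodyB rows cols col (g, comps) row).2) ∧
    (∀ p ∈ (bodyB rows cols col (g, comps) row).2, 0 ≤ p.1) := by
  unfold bodyA bodyB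
  by_cases hseed : gget g row col = 1
  · simp only [hseed, if_pos]
    obtain ⟨hg, P, hcells, hcnt, hmem, hbP⟩ := dfsB_bfsA rows cols
      (gridMeasure (mark g row col) + 1) (mark g row col) [(row, col)] [(row, col)] []
      0 PySem.Set.empty (by simp) (List.Perm.refl _)
      (by intro cc hcc
          simp only [List.mem_singleton] at hcc
          subst hcc
          exact ⟨hrow.1, hrow.2, hcol.1, hcol.2⟩)
    simp only [List.nil_append] at hcells
    have hclnd : (bfsA rows cols (mark g row col) [(row, col)] 0 PySem.Set.empty).2.2.Nodup :=
      bfsA_cl_nodup rows cols (gridMeasure (mark g row col) + 1) _ _ _ _ (by simp)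
        List.nodup_nil
    have hclpos : ∀ z ∈ (bfsA rows cols (mark g row col) [(row, col)] 0 PySem.Set.empty).2.2,
        0 ≤ z := by
      intro z hz
      rcases (hmem z).mp hz with h | h
      · simp [PySem.Set.empty] at h
      · obtain ⟨cc, hcc, rfl⟩ := List.mem_map.mp h
        exact (hbP cc hcc).2.2.1
    obtain ⟨hfl, hfk⟩ := fold_set_add
      ((bfsA rows cols (mark g row col) [(row, col)] 0 PySem.Set.empty).2.1)
      ((bfsA rows cols (mark g row col) [(row, col)] 0 PySem.Set.empty).2.2) ans hclnd hclpos
    refine ⟨hg, ?_, ?_⟩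
    · -- the updated answer list equals the per-column sums of the extended components list
      apply List.ext_getElem
      · rw [hfl, hans]
        simp
      · intro k hk1 hk2
        rw [← List.getD_eq_getElem _ 0 hk1, ← List.getD_eq_getElem _ 0 hk2]
        have hka : k < ans.length := by rw [← hfl]; exact (by simpa using hk1)
        rw [hfk k hka]
        have hkc : k < (cols - 0).toNat := by
          rw [hans] at hka
          simpa using hka
        have hrange : ∀ (f : Int → Int),
            ((PySem.List.pyRange 0 cols 1).map f).getD k 0 = f ((k : Int)) := by
          intro f
          rw [List.getD_eq_getElem _ 0 (by simpa using hkc), List.getElem_map,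
            PySem.List.getElem_pyRange_one]
          simp
        rw [hans, hrange, hrange, colSumsF_snoc]
        congr 1
        have hiff : ((k : Int)) ∈ (bfsA rows cols (mark g row col) [(row, col)] 0
            PySem.Set.empty).2.2 ↔
            ((PySem.Set.ofList ((dfsB rows cols (mark g row col) [(row, col)] []).2.map
              Prod.snd)).contains (k : Int) = true) := by
          rw [hmem, PySem.Set.contains_iff, PySem.Set.mem_ofList, hcells]
          simp [PySem.Set.empty]
        by_cases hin : ((k : Int)) ∈ (bfsA rows cols (mark g row col) [(row, col)] 0
            PySem.Set.empty).2.2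
        · rw [if_pos hin, if_pos (hiff.mp hin), hcnt, hcells]
          simp
        · rw [if_neg hin, if_neg (fun hc => hin (hiff.mpr hc))]
    · intro p hp
      rcases List.mem_append.mp hp with h | h
      · exact hpos p h
      · simp only [List.mem_singleton] at h
        subst h
        positivity
  · simp only [if_neg hseed]
    rw [bfsA]
    exact ⟨rfl, by simpa using hans, hpos⟩

lemma row_loop (rows cols col : Int) (hcol : 0 ≤ col ∧ col < cols) :
    ∀ (rl : List Int) (g : List (List Int)) (ans : List Int)
      (comps : List (Int × PySem.Set Int)),
      (∀ r ∈ rl, 0 ≤ r ∧ r < rows) →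
      ans = (PySem.List.pyRange 0 cols 1).map (colSumsF comps) →
      (∀ p ∈ comps, 0 ≤ p.1) →
      (rl.foldl (bodyA rows cols col) (g, ans)).1
          = (rl.foldl (bodyB rows cols col) (g, comps)).1 ∧
      (rl.foldl (bodyA rows cols col) (g, ans)).2
          = (PySem.List.pyRange 0 cols 1).map
              (colSumsF (rl.foldl (bodyB rows cols col) (g, comps)).2) ∧
      (∀ p ∈ (rl.foldl (bodyB rows cols col) (g, comps)).2, 0 ≤ p.1) := by
  intro rl
  induction rl with
  | nil =>
    intro g ans comps _ hans hpos
    exact ⟨rfl, hans, hpos⟩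
  | cons r rl ih =>
    intro g ans comps hb hans hpos
    obtain ⟨h1, h2, h3⟩ := body_step rows cols col r hcol (hb r (List.mem_cons_self ..))
      g ans comps hans hpos
    rw [List.foldl_cons, List.foldl_cons]
    rcases hA : bodyA rows cols col (g, ans) r with ⟨gA, ansA⟩
    rcases hB : bodyB rows cols col (g, comps) r with ⟨gB, compsB⟩
    rw [hA] at h1 h2
    rw [hB] at h1 h2 h3
    simp only at h1 h2 h3
    subst h1
    exact ih gA ansA compsB (fun r' hr' => hb r' (List.mem_cons_of_mem _ hr')) h2 h3

lemma col_loop (rows cols : Int) : ∀ (cli : List Int) (g : List (List Int)) (ans : List Int)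
    (comps : List (Int × PySem.Set Int)),
    (∀ c ∈ cli, 0 ≤ c ∧ c < cols) →
    ans = (PySem.List.pyRange 0 cols 1).map (colSumsF comps) →
    (∀ p ∈ comps, 0 ≤ p.1) →
    (cli.foldl (fun st col => (PySem.List.pyRange 0 rows 1).foldl (bodyA rows cols col) st)
        (g, ans)).1
      = (cli.foldl (fun st col => (PySem.List.pyRange 0 rows 1).foldl (bodyB rows cols col) st)
        (g, comps)).1 ∧
    (cli.foldl (fun st col => (PySem.List.pyRange 0 rows 1).foldl (bodyA rows cols col) st)
        (g, ans)).2
      = (PySem.List.pyRange 0 cols 1).map (colSumsF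
          (cli.foldl (fun st col => (PySem.List.pyRange 0 rows 1).foldl (bodyB rows cols col) st)
            (g, comps)).2) ∧
    (∀ p ∈ (cli.foldl (fun st col =>
        (PySem.List.pyRange 0 rows 1).foldl (bodyB rows cols col) st) (g, comps)).2,
      0 ≤ p.1) := by
  intro cli
  induction cli with
  | nil =>
    intro g ans comps _ hans hpos
    exact ⟨rfl, hans, hpos⟩
  | cons c cli ih =>
    intro g ans comps hb hans hpos
    have hrows : ∀ r ∈ PySem.List.pyRange 0 rows 1, 0 ≤ r ∧ r < rows := by
      intro r hr
      have := PySem.List.mem_pyRange_one.mp hr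
      exact ⟨this.1, this.2⟩
    obtain ⟨h1, h2, h3⟩ := row_loop rows cols c (hb c (List.mem_cons_self ..))
      (PySem.List.pyRange 0 rows 1) g ans comps hrows hans hpos
    rw [List.foldl_cons, List.foldl_cons]
    rcases hA : (PySem.List.pyRange 0 rows 1).foldl (bodyA rows cols c) (g, ans) with ⟨gA, ansA⟩
    rcases hB : (PySem.List.pyRange 0 rows 1).foldl (bodyB rows cols c) (g, comps)
      with ⟨gB, compsB⟩
    rw [hA] at h1 h2
    rw [hB] at h1 h2 h3
    simp only at h1 h2 h3
    subst h1
    exact ih gA ansA compsB (fun c' hc' => hb c' (List.mem_cons_of_mem _ hc')) h2 h3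

lemma init_ans (n : Nat) : List.replicate n (0 : Int)
    = (PySem.List.pyRange 0 (n : Int) 1).map (colSumsF []) := by
  have h : colSumsF [] = fun _ => (0 : Int) := rfl
  rw [h, List.map_const', PySem.List.length_pyRange_one]
  simp

-- A's final running-max loop is max(xs, default=0) on a list of nonnegatives
lemma final_max (xs : List Int) (hx : ∀ v ∈ xs, 0 ≤ v) :
    xs.foldl (fun a i => if i > a then i else a) 0 = PySem.List.maxD xs (fun v => v) 0 := by
  cases xs with
  | nil => rfl
  | cons x t =>
    unfold PySem.List.maxD
    rw [PySem.List.max?_id_cons]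
    simp only [Option.getD_some]
    rw [List.foldl_cons]
    have h0 : (if x > 0 then x else 0) = x := by
      have := hx x (List.mem_cons_self ..)
      split_ifs <;> omega
    rw [h0]
    have hstep : (fun (a i : Int) => if i > a then i else a) = fun a i => max a i := by
      funext a i
      rw [max_def]
      split_ifs <;> omega
    rw [hstep]

-- the ports, written via the named loop bodies (definitional)
lemma solutionA_eq (land : List (List Int)) : solution land =
    ((PySem.List.pyRange 0 ((land.headD []).length : Int) 1).foldl
      (fun st col => (PySem.List.pyRange 0 (land.length : Int) 1).foldl
        (bodyA (land.length : Int) ((land.headD []).length : Int) col) st)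
      (land, List.replicate (land.headD []).length 0)).2.foldl
        (fun a i => if i > a then i else a) 0 := rfl

lemma solutionB_eq (land : List (List Int)) : solution_alt land =
    PySem.List.maxD ((PySem.List.pyRange 0 ((land.headD []).length : Int) 1).map
      (colSumsF ((PySem.List.pyRange 0 ((land.headD []).length : Int) 1).foldl
        (fun st c => (PySem.List.pyRange 0 (land.length : Int) 1).foldl
          (bodyB (land.length : Int) ((land.headD []).length : Int) c) st)
        (land, [])).2)) (fun v => v) 0 := rfl

-- ===== VERDICT (by name: the statement is the Claim_ definition above) =====
theorem solution_spec : Claim_equal_solution := by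
  unfold Claim_equal_solution
  intro land _ _
  unfold Spec_solution
  rw [solutionA_eq, solutionB_eq]
  have hcols : ∀ c ∈ PySem.List.pyRange 0 ((land.headD []).length : Int) 1,
      0 ≤ c ∧ c < ((land.headD []).length : Int) := by
    intro c hc
    have := PySem.List.mem_pyRange_one.mp hc
    exact ⟨this.1, this.2⟩
  obtain ⟨h1, h2, h3⟩ := col_loop (land.length : Int) ((land.headD []).length : Int)
    (PySem.List.pyRange 0 ((land.headD []).length : Int) 1) land
    (List.replicate (land.headD []).length 0) [] hcols (init_ans _) (by simp)
  rw [h2]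
  apply final_max
  intro v hv
  obtain ⟨c, hc, rfl⟩ := List.mem_map.mp hv
  exact colSumsF_nonneg _ h3 c
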